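-- pv_equiv track=rewrite | github.com/code-enig/Python | 32th/이모티콘할인행사.py | n_signed_and_profit
-- ===== SOURCE A (Python) =====
-- def n_signed_and_profit(users, emoticons, percents): # 가입한 유저수와 이익을 돌려주는 함수
--     n_signed_users = 0 # 가입한유저수
--     profit = 0 # 이익
--     for i in range(len(users)):
--         money = 0 # 이모티콘을 구입하는데 필요한 비용
--         for j in range(len(emoticons)):
--             if users[i][0] <= percents[j]: #할인율이 주어진 값보다 크다면 구입한다.
--                 money += (emoticons[j]*(100-percents[j]))//100 # 어차피 나누어 떨어지므로 //100으로하여 정수형으로 놔둔다.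
--
--         if money >= users[i][1]: # 비용이 주어진 값보다 크다면
--             n_signed_users += 1 # 가입한다.
--         else:
--             profit += money # 아니라면 비용을 이익에 더해준다.
--
--     return n_signed_users, profit
-- ===== SOURCE B (Python) =====
-- def n_signed_and_profit(users, emoticons, percents):
--     # Sort emoticons by discount percent, precompute suffix sums of discounted
--     # prices, then binary-search each user's threshold: O((U+E) log E).
--     pairs = sorted(((p, e * (100 - p) // 100) for p, e in zip(percents, emoticons)),
--                    key=lambda q: q[0])
--     ps = [q[0] for q in pairs]
--     suffix = [0]
--     for q in reversed(pairs):
--         suffix.append(suffix[-1] + q[1])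
--     suffix.reverse()
--     n_signed = 0
--     profit = 0
--     for u in users:
--         t = u[0]
--         lo, hi = 0, len(ps)
--         while lo < hi:
--             mid = (lo + hi) // 2
--             if ps[mid] < t:
--                 lo = mid + 1
--             else:
--                 hi = mid
--         money = suffix[lo]
--         if money >= u[1]:
--             n_signed += 1
--         else:
--             profit += money
--     return n_signed, profit
-- ===== Notes on version B (the rewrite author's own statement) =====
-- stated objective: faster
-- what changed: Instead of scanning every emoticon for every user (O(U*E)), B sorts the emoticons by discount percent once, precomputes suffix sums of the discounted prices, and answers each user's money by a binary search on the sorted percents.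
import Mathlib
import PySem

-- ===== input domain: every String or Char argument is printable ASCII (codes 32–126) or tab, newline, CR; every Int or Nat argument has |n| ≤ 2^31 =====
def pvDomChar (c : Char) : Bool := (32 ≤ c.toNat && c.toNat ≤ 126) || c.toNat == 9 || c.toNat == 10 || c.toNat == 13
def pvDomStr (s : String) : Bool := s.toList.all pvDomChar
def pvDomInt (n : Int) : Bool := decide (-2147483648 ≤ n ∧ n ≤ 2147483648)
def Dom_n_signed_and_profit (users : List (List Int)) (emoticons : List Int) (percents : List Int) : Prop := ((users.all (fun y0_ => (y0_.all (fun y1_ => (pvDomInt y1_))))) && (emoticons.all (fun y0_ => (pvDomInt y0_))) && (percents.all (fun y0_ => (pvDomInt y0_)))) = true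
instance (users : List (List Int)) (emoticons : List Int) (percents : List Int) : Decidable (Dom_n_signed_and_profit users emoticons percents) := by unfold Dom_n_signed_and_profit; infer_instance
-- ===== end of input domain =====

-- B replaces A's per-user scan of all emoticons by sort + suffix sums + binary search; return values proved equal on Pre_.

-- ===== PORT A =====
def n_signed_and_profit (users : List (List Int)) (emoticons : List Int) (percents : List Int) : Int × Int :=
  (PySem.List.pyRange 0 (users.length : Int) 1).foldl (fun (acc : Int × Int) i =>
    let money : Int := (PySem.List.pyRange 0 (emoticons.length : Int) 1).foldl (fun (m : Int) j =>
      if PySem.List.pyGetD (PySem.List.pyGetD users i []) 0 0 ≤ PySem.List.pyGetD percents j 0 then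
        m + PySem.Int.floordiv (PySem.List.pyGetD emoticons j 0 * (100 - PySem.List.pyGetD percents j 0)) 100
      else m) 0
    if money ≥ PySem.List.pyGetD (PySem.List.pyGetD users i []) 1 0 then (acc.1 + 1, acc.2)
    else (acc.1, acc.2 + money)) (0, 0)

-- ===== PORT B =====
-- hand-written binary search of Source B (while lo < hi: mid = (lo+hi)//2 …); indices stay in range so getD is exact
def pvLbAux (ps : List Int) (t : Int) (lo hi : Nat) : Nat :=
  if _h : lo < hi then
    let mid := (lo + hi) / 2
    if ps.getD mid 0 < t then pvLbAux ps t (mid + 1) hi else pvLbAux ps t lo mid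
  else lo
termination_by hi - lo
decreasing_by all_goals omega

def n_signed_and_profit_alt (users : List (List Int)) (emoticons : List Int) (percents : List Int) : Int × Int :=
  let pairs := PySem.List.sorted ((percents.zip emoticons).map
      (fun q => (q.1, PySem.Int.floordiv (q.2 * (100 - q.1)) 100))) (fun q => q.1) false
  let ps := pairs.map (fun q => q.1)
  let suffix := (pairs.reverse.foldl (fun (acc : List Int) q => acc ++ [acc.getLastD 0 + q.2]) [0]).reverse
  users.foldl (fun (acc : Int × Int) u =>
    let t := PySem.List.pyGetD u 0 0
    let money := suffix.getD (pvLbAux ps t 0 ps.length) 0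
    if money ≥ PySem.List.pyGetD u 1 0 then (acc.1 + 1, acc.2)
    else (acc.1, acc.2 + money)) (0, 0)

-- ===== PRECONDITION & SPEC =====
-- Pre_ excludes exactly the inputs on which the Python A raises IndexError: with at least one user,
-- a user row with fewer than 2 entries, or percents shorter than emoticons (with no users, A returns).
def Pre_n_signed_and_profit (users : List (List Int)) (emoticons : List Int) (percents : List Int) : Prop :=
  users = [] ∨ (emoticons.length ≤ percents.length ∧ ∀ u ∈ users, 2 ≤ u.length)
instance (users : List (List Int)) (emoticons : List Int) (percents : List Int) : Decidable (Pre_n_signed_and_profit users emoticons percents) := by unfold Pre_n_signed_and_profit; infer_instance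

def pvWitness_n_signed_and_profit : List (List Int) × List Int × List Int :=
  ([[40, 10000], [25, 10]], [7000, 9000], [40, 10])

def Spec_n_signed_and_profit (users : List (List Int)) (emoticons : List Int) (percents : List Int) (out : Int × Int) : Prop := out = n_signed_and_profit_alt users emoticons percents
instance (users : List (List Int)) (emoticons : List Int) (percents : List Int) (out : Int × Int) : Decidable (Spec_n_signed_and_profit users emoticons percents out) := by unfold Spec_n_signed_and_profit; infer_instance

-- ===== CLAIM (what is proved, stated in full; the proofs are below) =====
def Claim_equal_n_signed_and_profit : Prop := ∀ (users : List (List Int)) (emoticons : List Int) (percents : List Int), Dom_n_signed_and_profit users emoticons percents → Pre_n_signed_and_profit users emoticons percents → Spec_n_signed_and_profit users emoticons percents (n_signed_and_profit users emoticons percents)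

-- ===== LEMMAS AND PROOFS =====

def pvSfx (l : List (Int × Int)) : List Int :=
  (l.reverse.foldl (fun (acc : List Int) q => acc ++ [acc.getLastD 0 + q.2]) [0]).reverse

theorem pvSfx_cons (q : Int × Int) (l : List (Int × Int)) :
    pvSfx (q :: l) = ((pvSfx l).headD 0 + q.2) :: pvSfx l := by
  unfold pvSfx
  rw [List.reverse_cons, List.foldl_append]
  simp [List.headD_eq_head?_getD, List.getLastD_eq_getLast?, List.head?_reverse]

theorem pv_headD_getD (l : List Int) : l.headD 0 = l.getD 0 0 := by cases l <;> rfl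

theorem pvSfx_getD (l : List (Int × Int)) : ∀ i, i ≤ l.length →
    (pvSfx l).getD i 0 = ((l.drop i).map (fun q => q.2)).sum := by
  induction l with
  | nil =>
    intro i hi
    have h0 : i = 0 := by simpa using hi
    subst h0; rfl
  | cons q l ih =>
    intro i hi
    rw [pvSfx_cons]
    cases i with
    | zero =>
      simp only [List.getD_cons_zero, List.drop_zero, List.map_cons, List.sum_cons]
      rw [pv_headD_getD, ih 0 (Nat.zero_le _)]
      simp; ring
    | succ i =>
      have hi' : i ≤ l.length := by simpa using hi
      simpa using ih i hi'

theorem pvLbAux_le (ps : List Int) (t : Int) :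
    ∀ n lo hi, hi - lo ≤ n → lo ≤ hi → pvLbAux ps t lo hi ≤ hi := by
  intro n
  induction n with
  | zero =>
    intro lo hi h1 h2
    rw [pvLbAux]
    simp [show ¬ lo < hi by omega]
    omega
  | succ n ih =>
    intro lo hi h1 h2
    rw [pvLbAux]
    by_cases h : lo < hi
    · simp only [h, dif_pos]
      split
      · exact ih _ _ (by omega) (by omega)
      · exact le_trans (ih _ _ (by omega) (by omega)) (by omega)
    · simp [h]; omega

theorem pvLbAux_spec (ps : List Int) (t : Int)
    (hmono : ∀ i j, i ≤ j → j < ps.length → ps.getD i 0 ≤ ps.getD j 0) :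
    ∀ n lo hi, hi - lo ≤ n → lo ≤ hi → hi ≤ ps.length →
    (∀ k, k < lo → ps.getD k 0 < t) →
    (∀ k, hi ≤ k → k < ps.length → t ≤ ps.getD k 0) →
    (∀ k, k < pvLbAux ps t lo hi → ps.getD k 0 < t) ∧
    (∀ k, pvLbAux ps t lo hi ≤ k → k < ps.length → t ≤ ps.getD k 0) := by
  intro n
  induction n with
  | zero =>
    intro lo hi h1 h2 h3 hlow hhigh
    rw [pvLbAux]
    simp only [show ¬ lo < hi by omega, dif_neg, not_false_iff]
    exact ⟨hlow, fun k hk hk2 => hhigh k (by omega) hk2⟩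
  | succ n ih =>
    intro lo hi h1 h2 h3 hlow hhigh
    rw [pvLbAux]
    by_cases h : lo < hi
    · simp only [h, dif_pos]
      split
      next hc =>
        apply ih ((lo + hi) / 2 + 1) hi (by omega) (by omega) h3
        · intro k hk
          calc ps.getD k 0 ≤ ps.getD ((lo + hi) / 2) 0 := hmono _ _ (by omega) (by omega)
            _ < t := hc
        · exact hhigh
      next hc =>
        apply ih lo ((lo + hi) / 2) (by omega) (by omega) (by omega) hlow
        intro k hk hk2
        calc t ≤ ps.getD ((lo + hi) / 2) 0 := by omega
          _ ≤ ps.getD k 0 := hmono _ _ (by omega) hk2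
    · simp only [h, dif_neg, not_false_iff]
      exact ⟨hlow, fun k hk hk2 => hhigh k (by omega) hk2⟩

theorem pv_filter_eq_drop (l : List (Int × Int)) (t : Int) (r : Nat) (hr : r ≤ l.length)
    (h1 : ∀ k (hk : k < l.length), k < r → (l[k]).1 < t)
    (h2 : ∀ k (hk : k < l.length), r ≤ k → t ≤ (l[k]).1) :
    l.filter (fun q => decide (t ≤ q.1)) = l.drop r := by
  conv_lhs => rw [← List.take_append_drop r l]
  rw [List.filter_append]
  have htake : (l.take r).filter (fun q => decide (t ≤ q.1)) = [] := by
    rw [List.filter_eq_nil_iff]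
    intro a ha
    rw [List.mem_iff_getElem] at ha
    obtain ⟨k, hk, rfl⟩ := ha
    have hk' : k < l.length := by simp at hk; omega
    have hkr : k < r := by simp at hk; omega
    rw [List.getElem_take]
    simp only [decide_eq_true_eq, not_le]
    exact h1 k hk' hkr
  have hdrop : (l.drop r).filter (fun q => decide (t ≤ q.1)) = l.drop r := by
    rw [List.filter_eq_self]
    intro a ha
    rw [List.mem_iff_getElem] at ha
    obtain ⟨k, hk, rfl⟩ := ha
    rw [List.getElem_drop]
    simp only [decide_eq_true_eq]
    exact h2 (r + k) (by simp at hk; omega) (by omega)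
  rw [htake, hdrop, List.nil_append]

theorem pv_sum_ite_of_filter (l : List (Int × Int)) (p : Int × Int → Bool) :
    ((l.filter p).map (fun q => q.2)).sum = (l.map (fun q => if p q then q.2 else (0:Int))).sum := by
  induction l with
  | nil => rfl
  | cons q l ih => by_cases h : p q <;> simp [h, ih]

theorem pv_mapRange_eq_mapZip (P E : List Int) (t : Int) (h : E.length ≤ P.length)
    (F : Int → Int → Int) :
    (List.range E.length).map (fun k => if t ≤ P.getD k 0 then F (P.getD k 0) (E.getD k 0) else (0:Int))
      = (P.zip E).map (fun q => if t ≤ q.1 then F q.1 q.2 else (0:Int)) := by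
  apply List.ext_getElem
  · simp [List.length_zip]; omega
  · intro k h1 h2
    simp only [List.getElem_map, List.getElem_range]
    have hkE : k < E.length := by simpa using h1
    have hkP : k < P.length := by omega
    rw [List.getElem_zip, List.getD_eq_getElem _ _ hkP, List.getD_eq_getElem _ _ hkE]


theorem pv_psget (pairs : List (Int × Int)) (ps : List Int)
    (hps : ps = pairs.map (fun q => q.1)) :
    ∀ k, k < pairs.length → ∀ (hk : k < pairs.length), ps.getD k 0 = (pairs[k]).1 := by
  intro k _ hk
  subst hps
  rw [List.getD_eq_getElem _ _ (by simpa using hk)]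
  simp

theorem pv_sorted_money (pairs : List (Int × Int)) (ps : List Int)
    (hps : ps = pairs.map (fun q => q.1)) (hp : ps.Pairwise (· ≤ ·)) (t : Int) :
    (pvSfx pairs).getD (pvLbAux ps t 0 ps.length) 0
      = ((pairs.filter (fun q => decide (t ≤ q.1))).map (fun q => q.2)).sum := by
  have hlen : ps.length = pairs.length := by rw [hps]; simp
  have hget := pv_psget pairs ps hps
  have hmono : ∀ i j, i ≤ j → j < ps.length → ps.getD i 0 ≤ ps.getD j 0 := by
    intro i j hij hj
    rcases Nat.lt_or_ge i j with h | h
    · rw [List.pairwise_iff_getElem] at hp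
      rw [List.getD_eq_getElem _ _ (by omega), List.getD_eq_getElem _ _ hj]
      exact hp i j (by omega) hj h
    · have : i = j := by omega
      subst this; rfl
  obtain ⟨hlt, hge⟩ := pvLbAux_spec ps t hmono ps.length 0 ps.length (by omega) (by omega) le_rfl
      (fun k hk => absurd hk (by omega)) (fun k hk1 hk2 => absurd hk1 (by omega))
  have hr : pvLbAux ps t 0 ps.length ≤ pairs.length := by
    have := pvLbAux_le ps t ps.length 0 ps.length (by omega) (by omega)
    omega
  have h1' : ∀ k (hk : k < pairs.length), k < pvLbAux ps t 0 ps.length → (pairs[k]).1 < t := by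
    intro k hk hkr
    have h := hlt k hkr
    rwa [hget k hk hk] at h
  have h2' : ∀ k (hk : k < pairs.length), pvLbAux ps t 0 ps.length ≤ k → t ≤ (pairs[k]).1 := by
    intro k hk hkr
    have h := hge k hkr (by omega)
    rwa [hget k hk hk] at h
  rw [pvSfx_getD pairs _ hr, ← pv_filter_eq_drop pairs t _ hr h1' h2']

theorem pv_money_eq (P E : List Int) (t : Int) (hE : E.length ≤ P.length) :
    (PySem.List.pyRange 0 (E.length : Int) 1).foldl (fun (m : Int) j =>
      if t ≤ PySem.List.pyGetD P j 0 then
        m + PySem.Int.floordiv (PySem.List.pyGetD E j 0 * (100 - PySem.List.pyGetD P j 0)) 100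
      else m) 0
    =
    (let pairs := PySem.List.sorted ((P.zip E).map
        (fun q => (q.1, PySem.Int.floordiv (q.2 * (100 - q.1)) 100))) (fun q => q.1) false
     ((pairs.reverse.foldl (fun (acc : List Int) q => acc ++ [acc.getLastD 0 + q.2]) [0]).reverse).getD
       (pvLbAux (pairs.map (fun q => q.1)) t 0 (pairs.map (fun q => q.1)).length) 0) := by
  have hp : ((PySem.List.sorted ((P.zip E).map
      (fun q => (q.1, PySem.Int.floordiv (q.2 * (100 - q.1)) 100))) (fun q => q.1) false).map
        (fun q => q.1)).Pairwise (· ≤ ·) :=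
    PySem.List.sorted_map_key_pairwise _ _
  show _ = (pvSfx (PySem.List.sorted ((P.zip E).map
      (fun q => (q.1, PySem.Int.floordiv (q.2 * (100 - q.1)) 100))) (fun q => q.1) false)).getD _ 0
  rw [pv_sorted_money _ _ rfl hp t]
  have hperm : ((PySem.List.sorted ((P.zip E).map
        (fun q => (q.1, PySem.Int.floordiv (q.2 * (100 - q.1)) 100))) (fun q => q.1) false).filter
          (fun q => decide (t ≤ q.1))).map (fun q => q.2) |>.Perm
      ((((P.zip E).map (fun q => (q.1, PySem.Int.floordiv (q.2 * (100 - q.1)) 100))).filter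
          (fun q => decide (t ≤ q.1))).map (fun q => q.2)) :=
    ((PySem.List.sorted_perm _ _ _).filter _).map _
  rw [hperm.sum_eq]
  rw [pv_sum_ite_of_filter, List.map_map]
  have hbody : (fun (m : Int) j =>
      if t ≤ PySem.List.pyGetD P j 0 then
        m + PySem.Int.floordiv (PySem.List.pyGetD E j 0 * (100 - PySem.List.pyGetD P j 0)) 100
      else m) = (fun (m : Int) j => m +
        (if t ≤ PySem.List.pyGetD P j 0 then
          PySem.Int.floordiv (PySem.List.pyGetD E j 0 * (100 - PySem.List.pyGetD P j 0)) 100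
        else 0)) := by
    funext m j; split <;> simp
  rw [hbody, PySem.List.foldl_add, zero_add, PySem.List.pyRange_zero_nat, List.map_map]
  have hfun : ((fun j => if t ≤ PySem.List.pyGetD P j 0 then
        PySem.Int.floordiv (PySem.List.pyGetD E j 0 * (100 - PySem.List.pyGetD P j 0)) 100
      else 0) ∘ (fun (k : Nat) => (k : Int)))
      = (fun (k : Nat) => if t ≤ P.getD k 0 then
          PySem.Int.floordiv (E.getD k 0 * (100 - P.getD k 0)) 100 else (0:Int)) := by
    funext k; simp [Function.comp, PySem.List.pyGetD_natCast]
  rw [hfun, pv_mapRange_eq_mapZip P E t hE (fun p e => PySem.Int.floordiv (e * (100 - p)) 100)]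
  congr 1
  apply List.map_congr_left
  intro q hq
  simp

theorem pv_main (users : List (List Int)) (emoticons : List Int) (percents : List Int)
    (hE : emoticons.length ≤ percents.length) :
    n_signed_and_profit users emoticons percents = n_signed_and_profit_alt users emoticons percents := by
  unfold n_signed_and_profit n_signed_and_profit_alt
  rw [PySem.List.foldl_pyRange_zero_pyGetD' users ([] : List Int)
      (fun (acc : Int × Int) u =>
        let money : Int := (PySem.List.pyRange 0 (emoticons.length : Int) 1).foldl (fun (m : Int) j =>
          if PySem.List.pyGetD u 0 0 ≤ PySem.List.pyGetD percents j 0 then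
            m + PySem.Int.floordiv (PySem.List.pyGetD emoticons j 0 * (100 - PySem.List.pyGetD percents j 0)) 100
          else m) 0
        if money ≥ PySem.List.pyGetD u 1 0 then (acc.1 + 1, acc.2)
        else (acc.1, acc.2 + money)) ((0 : Int), (0 : Int))]
  apply PySem.List.foldl_congr_mem
  intro acc u _
  simp only []
  rw [pv_money_eq percents emoticons (PySem.List.pyGetD u 0 0) hE]

-- ===== VERDICT (by name: the statement is the Claim_ definition above) =====
theorem n_signed_and_profit_spec : Claim_equal_n_signed_and_profit := by
  intro users emoticons percents _hdom hpre
  unfold Spec_n_signed_and_profit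
  rcases hpre with h | h
  · subst h
    simp [n_signed_and_profit, n_signed_and_profit_alt, PySem.List.pyRange_zero_nat]
  · exact pv_main users emoticons percents h.1
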